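-- pv_equiv track=rewrite | github.com/thisis-sb/teaching | char_permut.py | recursive_method
-- ===== SOURCE A (Python) =====
-- def recursive_method(inp: list):
--     if len(inp) == 2:
--         return [inp[0], (inp[0] + inp[1]), inp[1], (inp[1] + inp[0])]
--
--     res = []
--     for c1 in inp:
--         r1 = recursive_method([c2 for c2 in inp if c2 != c1])
--         res = res + [c1] + [c1+c3 for c3 in r1]
--
--     return sorted(list(set(res)))
-- ===== SOURCE B (Python) =====
-- def recursive_method(inp: list):
--     # Enumerate every non-empty "partial permutation" prefix exactly once by
--     # picking remaining characters by position; dedup and sort once at the end.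
--     def gen(pre, rem):
--         out = []
--         for i in range(len(rem)):
--             s = pre + rem[i]
--             out.append(s)
--             out += gen(s, rem[:i] + rem[i + 1:])
--         return out
--     return sorted(set(gen("", inp)))
-- ===== Notes on version B (the rewrite author's own statement) =====
-- stated objective: alternative
-- what changed: B generates every partial-permutation string exactly once by removing characters by position in a single recursive enumeration and sorts/dedups once at the end, instead of A's re-filtering by value and re-sorting/dedup at every node of the recursion.
-- intended difference: On length-2 inputs whose raw list [a, a+b, b, b+a] is not already strictly increasing, A returns that unsorted (possibly duplicated) base-case list while B returns the sorted deduplicated list produced everywhere else, which is the function's evident intent. — e.g. on recursive_method(["b", "a"]): A returns ["b", "ba", "a", "ab"], B returns ["a", "ab", "b", "ba"]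
-- outside the precondition, e.g. on recursive_method(['a', 'a']): A returns ['a', 'aa', 'a', 'aa'], B returns ['a', 'aa']
import Mathlib
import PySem

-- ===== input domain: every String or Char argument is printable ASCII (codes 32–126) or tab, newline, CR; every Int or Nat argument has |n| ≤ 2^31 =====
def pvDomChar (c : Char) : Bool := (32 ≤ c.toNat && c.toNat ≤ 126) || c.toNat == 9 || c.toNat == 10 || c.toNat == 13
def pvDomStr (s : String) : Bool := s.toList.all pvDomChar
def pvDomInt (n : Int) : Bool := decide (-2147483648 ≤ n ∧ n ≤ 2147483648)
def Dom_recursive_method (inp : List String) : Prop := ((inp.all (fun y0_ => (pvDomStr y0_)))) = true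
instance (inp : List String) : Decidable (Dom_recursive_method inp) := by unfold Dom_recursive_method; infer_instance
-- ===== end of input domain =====

-- B enumerates every partial-permutation string once (removal by position) and sorts/dedups once
-- at the end, instead of A's per-node re-filtering by value and re-sorting at every recursion level.

-- ===== PORT A =====
-- Literal port of A: len==2 base case returns the raw 4-element list; otherwise a loop
-- accumulating res, recursing on the list with all occurrences of c1 filtered out by value,
-- finishing with sorted(list(set(res))).
def recursive_method (inp : List String) : List String :=
  if inp.length = 2 then
    [inp.getD 0 "", inp.getD 0 "" ++ inp.getD 1 "", inp.getD 1 "",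
     inp.getD 1 "" ++ inp.getD 0 ""]
  else
    PySem.List.sorted
      (PySem.Set.ofList
        (inp.attach.foldl
          (fun res c1 =>
            res ++ [c1.1] ++
              (recursive_method (inp.filter (· != c1.1))).map (fun c3 => c1.1 ++ c3))
          []))
      (fun x => x) false
termination_by inp.length
decreasing_by
  simp only [List.unattach_filter, List.unattach_attach]
  refine (List.length_filter_lt_length_iff_exists ..).mpr ⟨c1.1, c1.2, ?_⟩
  simp

-- ===== PORT B =====
-- picks rem = [(rem[i], rem[:i] + rem[i+1:]) for i in range(len(rem))], the loop domain of gen.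
def picks : List String → List (String × List String)
  | [] => []
  | c :: rest => (c, rest) :: (picks rest).map (fun p => (p.1, c :: p.2))

theorem picks_snd_length {rem : List String} {p : String × List String}
    (h : p ∈ picks rem) : p.2.length + 1 = rem.length := by
  induction rem generalizing p with
  | nil => simp [picks] at h
  | cons c rest ih =>
    simp only [picks, List.mem_cons, List.mem_map] at h
    rcases h with rfl | ⟨q, hq, rfl⟩
    · rfl
    · simpa using ih hq

-- gen(pre, rem): for each position i, emit pre+rem[i] and recurse on the rest.
def genAll (pre : String) (rem : List String) : List String :=
  (picks rem).attach.foldl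
    (fun out p => out ++ [pre ++ p.1.1] ++ genAll (pre ++ p.1.1) p.1.2) []
termination_by rem.length
decreasing_by
  have := picks_snd_length p.2; omega

def recursive_method_alt (inp : List String) : List String :=
  PySem.List.sorted (PySem.Set.ofList (genAll "" inp)) (fun x => x) false

-- ===== PRECONDITION & SPEC =====
-- Pre_ excludes lists with a repeated NON-EMPTY element: A filters recursively BY VALUE, so on
-- such lists its result depends accidentally on whether the length-2 base case is reached with
-- two equal strings (it can then concatenate an element with itself, e.g. 'baa' from
-- ['a','a','b'], while dropping other arrangements); B treats the input positionally. Repeated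
-- empty strings are harmless ('' is neutral for concatenation) and stay inside Pre_.
def Pre_recursive_method (inp : List String) : Prop := (inp.filter (· != "")).Nodup
instance (inp : List String) : Decidable (Pre_recursive_method inp) := by
  unfold Pre_recursive_method; infer_instance

def pvWitness_recursive_method : List String := ["a", "b", "c"]

-- On length-2 inputs whose raw base-case list [a, a+b, b, b+a] is not already strictly
-- increasing, A returns that unsorted/duplicated raw list while B returns the sorted
-- deduplicated list it produces everywhere else, which is the function's evident intent.
def D_recursive_method (inp : List String) : Prop :=
  inp.length = 2 ∧
    ¬ ((inp.getD 0 "").toList < (inp.getD 1 "").toList ∧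
       (inp.getD 0 "" ++ inp.getD 1 "").toList < (inp.getD 1 "").toList)
instance (inp : List String) : Decidable (D_recursive_method inp) := by
  unfold D_recursive_method; infer_instance

def Spec_recursive_method (inp : List String) (out : List String) : Prop :=
  ¬ D_recursive_method inp → out = recursive_method_alt inp
instance (inp : List String) (out : List String) : Decidable (Spec_recursive_method inp out) := by
  unfold Spec_recursive_method; infer_instance

def pvDiffWitness_recursive_method : List String := ["b", "a"]
def pvDiffWitnessOut_recursive_method : (List String) × (List String) :=
  (["b", "ba", "a", "ab"], ["a", "ab", "b", "ba"])

-- ===== CLAIM (what is proved, stated in full; the proofs are below) =====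
def Claim_unchanged_recursive_method : Prop :=
  ∀ (inp : List String), Dom_recursive_method inp → Pre_recursive_method inp →
    Spec_recursive_method inp (recursive_method inp)
def Claim_changed_recursive_method : Prop :=
  Dom_recursive_method (pvDiffWitness_recursive_method) ∧
  Pre_recursive_method (pvDiffWitness_recursive_method) ∧
  D_recursive_method (pvDiffWitness_recursive_method) ∧
  recursive_method (pvDiffWitness_recursive_method) = pvDiffWitnessOut_recursive_method.1 ∧
  recursive_method_alt (pvDiffWitness_recursive_method) = pvDiffWitnessOut_recursive_method.2 ∧
  pvDiffWitnessOut_recursive_method.1 ≠ pvDiffWitnessOut_recursive_method.2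
def Claim_exact_recursive_method : Prop :=
  ∀ (inp : List String), Dom_recursive_method inp → Pre_recursive_method inp →
    D_recursive_method inp → recursive_method inp ≠ recursive_method_alt inp

-- ===== LEMMAS AND PROOFS =====

theorem genAll_eq (pre : String) (rem : List String) :
    genAll pre rem =
      (picks rem).flatMap (fun p => (pre ++ p.1) :: genAll (pre ++ p.1) p.2) := by
  rw [genAll]
  have hfe : (fun (out : List String) (p : {x // x ∈ picks rem}) =>
      out ++ [pre ++ p.1.1] ++ genAll (pre ++ p.1.1) p.1.2) =
      (fun out p => out ++ ((pre ++ p.1.1) :: genAll (pre ++ p.1.1) p.1.2)) := by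
    funext out p; simp
  rw [hfe]
  rw [List.foldl_attach (f := fun out (p : String × List String) =>
    out ++ ((pre ++ p.1) :: genAll (pre ++ p.1) p.2))]
  rw [PySem.List.foldl_append_eq_flatMap]
  simp

theorem recursive_method_eq (inp : List String) (h : ¬ inp.length = 2) :
    recursive_method inp =
      PySem.List.sorted
        (PySem.Set.ofList
          (inp.flatMap (fun c1 =>
            c1 :: (recursive_method (inp.filter (· != c1))).map (fun c3 => c1 ++ c3))))
        (fun x => x) false := by
  rw [recursive_method, if_neg h]
  have hfe : (fun (res : List String) (c1 : {x // x ∈ inp}) =>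
      res ++ [c1.1] ++ (recursive_method (inp.filter (· != c1.1))).map (fun c3 => c1.1 ++ c3)) =
      (fun res c1 => res ++
        (c1.1 :: (recursive_method (inp.filter (· != c1.1))).map (fun c3 => c1.1 ++ c3))) := by
    funext res c1; simp
  rw [hfe]
  rw [List.foldl_attach (f := fun res c1 => res ++
    (c1 :: (recursive_method (inp.filter (· != c1))).map (fun c3 => c1 ++ c3)))]
  rw [PySem.List.foldl_append_eq_flatMap]
  simp

theorem genAll_nil (pre : String) : genAll pre [] = [] := by
  rw [genAll_eq]; simp [picks]

theorem genAll_single (pre a : String) : genAll pre [a] = [pre ++ a] := by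
  rw [genAll_eq]; simp [picks, genAll_nil]

theorem genAll_pair (a b : String) : genAll "" [a, b] = [a, a ++ b, b, b ++ a] := by
  rw [genAll_eq]; simp [picks, genAll_single]

theorem base_eval (a b : String) : recursive_method [a, b] = [a, a ++ b, b, b ++ a] := by
  rw [recursive_method]; simp

theorem picks_perm {rem : List String} {p : String × List String}
    (h : p ∈ picks rem) : (p.1 :: p.2).Perm rem := by
  induction rem generalizing p with
  | nil => simp [picks] at h
  | cons c rest ih =>
    simp only [picks, List.mem_cons, List.mem_map] at h
    rcases h with rfl | ⟨q, hq, rfl⟩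
    · exact List.Perm.refl _
    · exact (List.Perm.swap c q.1 q.2).trans ((ih hq).cons c)

theorem picks_of_mem {c : String} {rem : List String} (h : c ∈ rem) :
    (c, rem.erase c) ∈ picks rem := by
  induction rem with
  | nil => simp at h
  | cons a t ih =>
    by_cases hca : c = a
    · subst hca
      simp [picks, List.erase_cons_head]
    · have hct : c ∈ t := by
        rcases List.mem_cons.mp h with h' | h'
        · exact absurd h' hca
        · exact h'
      have hne : ¬ (a == c) = true := by
        simp only [beq_iff_eq]; exact fun h' => hca h'.symm
      simp only [picks, List.mem_cons, List.mem_map]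
      exact Or.inr ⟨(c, t.erase c), ih hct, by simp [List.erase_cons_tail hne]⟩

theorem subperm_iff_count {l m : List String} :
    List.Subperm l m ↔ ∀ x, l.count x ≤ m.count x := by
  rw [List.subperm_ext_iff]
  constructor
  · intro h x
    by_cases hx : x ∈ l
    · exact h x hx
    · simp [List.count_eq_zero_of_not_mem hx]
  · intro h x _
    exact h x

theorem genAll_prefix (rem : List String) (pre : String) :
    genAll pre rem = (genAll "" rem).map (fun s => pre ++ s) := by
  induction hn : rem.length using Nat.strong_induction_on generalizing rem pre with
  | _ n ih =>
    subst hn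
    rw [genAll_eq, genAll_eq "", List.map_flatMap]
    refine List.flatMap_congr ?_
    intro p hp
    have hlt : p.2.length < rem.length := by have := picks_snd_length hp; omega
    rw [ih p.2.length hlt p.2 (pre ++ p.1) rfl, ih p.2.length hlt p.2 ("" ++ p.1) rfl]
    simp [List.map_map, Function.comp, String.append_assoc]

def sconcat : List String → String
  | [] => ""
  | a :: t => a ++ sconcat t

theorem sconcat_filter (l : List String) : sconcat (l.filter (· != "")) = sconcat l := by
  induction l with
  | nil => rfl
  | cons a t ih =>
    by_cases ha : a = ""
    · subst ha; simpa [sconcat] using ih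
    · simp [ha, sconcat, ih]

-- x is a concatenation of a non-empty duplicate-free sequence of elements of rem
def chSpec (rem : List String) (x : String) : Prop :=
  ∃ l, l ≠ [] ∧ l.Nodup ∧ (∀ y ∈ l, y ∈ rem) ∧ x = sconcat l

theorem count_filter_ne (l : List String) {y : String} (hy : y ≠ "") :
    (l.filter (· != "")).count y = l.count y := by
  rw [List.count_filter]; simp [hy]

theorem count_le_one_of_preNE {inp : List String} (hnd : (inp.filter (· != "")).Nodup)
    {y : String} (hy : y ≠ "") : inp.count y ≤ 1 := by
  have h := List.nodup_iff_count_le_one.mp hnd y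
  rwa [count_filter_ne _ hy] at h

theorem preNE_filter {inp : List String} (hnd : (inp.filter (· != "")).Nodup) (c : String) :
    ((inp.filter (· != c)).filter (· != "")).Nodup :=
  hnd.sublist (List.Sublist.filter _ (List.filter_sublist ..))

theorem mem_genAll_subperm (rem : List String) (x : String) :
    x ∈ genAll "" rem ↔ ∃ l, l ≠ [] ∧ List.Subperm l rem ∧ x = sconcat l := by
  induction hn : rem.length using Nat.strong_induction_on generalizing rem x with
  | _ n ih =>
    subst hn
    rw [genAll_eq]
    simp only [List.mem_flatMap, List.mem_cons]
    constructor
    · rintro ⟨p, hp, hx⟩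
      have hperm : (p.1 :: p.2).Perm rem := picks_perm hp
      have hlt : p.2.length < rem.length := by have := picks_snd_length hp; omega
      rcases hx with rfl | hx
      · refine ⟨[p.1], by simp, ?_, by simp [sconcat]⟩
        refine subperm_iff_count.mpr (fun y => ?_)
        rw [← hperm.count_eq]
        rcases eq_or_ne y p.1 with rfl | hy
        · simp [List.count_cons_self]
        · rw [List.count_cons_of_ne (Ne.symm hy),
            List.count_eq_zero_of_not_mem (show y ∉ ([] : List String) by simp)]
          simp
      · rw [genAll_prefix] at hx
        simp only [List.mem_map] at hx
        obtain ⟨y, hy, rfl⟩ := hx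
        obtain ⟨l', hl'ne, hl'sub, rfl⟩ := (ih _ hlt p.2 y rfl).mp hy
        refine ⟨p.1 :: l', by simp, ?_, by simp [sconcat]⟩
        refine subperm_iff_count.mpr (fun z => ?_)
        have h1 := subperm_iff_count.mp hl'sub z
        rw [← hperm.count_eq]
        rcases eq_or_ne z p.1 with rfl | hz
        · rw [List.count_cons_self, List.count_cons_self]; omega
        · rw [List.count_cons_of_ne (Ne.symm hz), List.count_cons_of_ne (Ne.symm hz)]; omega
    · rintro ⟨l, hlne, hlsub, rfl⟩
      obtain ⟨c, l', rfl⟩ := List.exists_cons_of_ne_nil hlne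
      have hc : c ∈ rem := hlsub.subset (by simp)
      have hpick : (c, rem.erase c) ∈ picks rem := picks_of_mem hc
      have hlt : (rem.erase c).length < rem.length := by
        have h1 := List.length_erase_of_mem hc
        have h0 : 0 < rem.length := List.length_pos_of_mem hc
        omega
      have hl'sub : List.Subperm l' (rem.erase c) := by
        refine subperm_iff_count.mpr (fun y => ?_)
        have h1 := subperm_iff_count.mp hlsub y
        rcases eq_or_ne y c with rfl | hy
        · rw [List.count_erase_self]
          rw [List.count_cons_self] at h1
          omega
        · rw [List.count_erase_of_ne hy]
          rw [List.count_cons_of_ne (Ne.symm hy)] at h1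
          omega
      by_cases hl' : l' = []
      · subst hl'
        exact ⟨(c, rem.erase c), hpick, Or.inl (by simp [sconcat])⟩
      · refine ⟨(c, rem.erase c), hpick, Or.inr ?_⟩
        rw [genAll_prefix]
        simp only [List.mem_map]
        exact ⟨sconcat l', (ih _ hlt _ _ rfl).mpr ⟨l', hl', hl'sub, rfl⟩, by simp [sconcat]⟩

theorem mem_genAll_char (rem : List String) (hnd : (rem.filter (· != "")).Nodup) (x : String) :
    x ∈ genAll "" rem ↔ chSpec rem x := by
  rw [mem_genAll_subperm]
  constructor
  · rintro ⟨l, hlne, hsub, rfl⟩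
    by_cases hm : l.filter (· != "") = []
    · have hall : ∀ y ∈ l, y = "" := fun y hy => by
        simpa using List.filter_eq_nil_iff.mp hm y hy
      have hnil : sconcat l = "" := by rw [← sconcat_filter, hm]; rfl
      obtain ⟨c, l', rfl⟩ := List.exists_cons_of_ne_nil hlne
      have hc0 : c = "" := hall c (by simp)
      have hcrem : ("" : String) ∈ rem := by
        rw [← hc0]; exact hsub.subset (by simp)
      refine ⟨[""], by simp, by simp, by simpa using hcrem, ?_⟩
      have h0 : sconcat [""] = "" := by decide
      rw [h0, hnil]
    · refine ⟨l.filter (· != ""), hm, ?_, ?_, (sconcat_filter l).symm⟩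
      · rw [List.nodup_iff_count_le_one]
        intro y
        by_cases hy : y ∈ l.filter (· != "")
        · have hyne : y ≠ "" := by simpa using (List.of_mem_filter hy)
          have h1 := count_filter_ne l hyne
          have h2 := subperm_iff_count.mp hsub y
          have h3 := count_le_one_of_preNE hnd hyne
          omega
        · simp [List.count_eq_zero_of_not_mem hy]
      · intro y hy
        exact hsub.subset (List.mem_of_mem_filter hy)
  · rintro ⟨l, hlne, hlnd, hlmem, rfl⟩
    refine ⟨l, hlne, ?_, rfl⟩
    refine subperm_iff_count.mpr (fun y => ?_)
    by_cases hy : y ∈ l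
    · have h1 := List.nodup_iff_count_le_one.mp hlnd y
      have h2 : 0 < rem.count y := List.count_pos_iff.mpr (hlmem y hy)
      omega
    · simp [List.count_eq_zero_of_not_mem hy]

theorem mem_A_char (inp : List String) (hnd : (inp.filter (· != "")).Nodup) (x : String) :
    x ∈ recursive_method inp ↔ chSpec inp x := by
  induction hn : inp.length using Nat.strong_induction_on generalizing inp x with
  | _ n ih =>
    subst hn
    by_cases h2 : inp.length = 2
    · match inp, h2, hnd with
      | [a, b], _, hnd =>
        rw [base_eval]
        constructor
        · intro hx
          simp only [List.mem_cons, List.not_mem_nil, or_false] at hx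
          rcases hx with hxa | hxab | hxb | hxba
          · exact ⟨[a], by simp, by simp, by simp, by simp [sconcat, hxa]⟩
          · by_cases hab : a = b
            · have ha : a = "" := by
                subst hab
                by_contra ha
                simp [ha] at hnd
              refine ⟨[""], by simp, by simp, by simp [ha], ?_⟩
              rw [hxab, ← hab, ha]; decide
            · exact ⟨[a, b], by simp, by simp [hab], by simp, by simp [sconcat, hxab]⟩
          · exact ⟨[b], by simp, by simp, by simp, by simp [sconcat, hxb]⟩
          · by_cases hab : a = b
            · have ha : a = "" := by
                subst hab
                by_contra ha
                simp [ha] at hnd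
              refine ⟨[""], by simp, by simp, by simp [ha], ?_⟩
              rw [hxba, ← hab, ha]; decide
            · exact ⟨[b, a], by simp,
                List.nodup_cons.mpr ⟨by simpa using Ne.symm hab, by simp⟩, by simp,
                by simp [sconcat, hxba]⟩
        · rintro ⟨l, hlne, hlnd, hlmem, rfl⟩
          match l, hlne with
          | [y], _ =>
            have hy := hlmem y (by simp)
            simp only [List.mem_cons, List.not_mem_nil, or_false] at hy
            rcases hy with rfl | rfl <;> simp [sconcat]
          | [y, z], _ =>
            have hy := hlmem y (by simp)
            have hz := hlmem z (by simp)
            have hyz : y ≠ z := by simp at hlnd; exact hlnd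
            simp only [List.mem_cons, List.not_mem_nil, or_false] at hy hz
            rcases hy with rfl | rfl <;> rcases hz with rfl | rfl <;>
              first
              | exact absurd rfl hyz
              | simp [sconcat]
          | y :: z :: w :: t, _ =>
            have hy := hlmem y (by simp)
            have hz := hlmem z (by simp)
            have hw := hlmem w (by simp)
            simp only [List.mem_cons, List.not_mem_nil, or_false] at hy hz hw
            simp only [List.nodup_cons, List.mem_cons] at hlnd
            rcases hy with rfl | rfl <;> rcases hz with rfl | rfl <;>
              rcases hw with rfl | rfl <;> simp_all
    · rw [recursive_method_eq inp h2, PySem.List.mem_sorted, PySem.Set.mem_ofList,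
        List.mem_flatMap]
      constructor
      · rintro ⟨c, hc, hx⟩
        rcases List.mem_cons.mp hx with hxc | hx
        · exact ⟨[c], by simp, by simp, by simp [hc], by simp [sconcat, hxc]⟩
        · simp only [List.mem_map] at hx
          obtain ⟨y, hy, rfl⟩ := hx
          have hlen : (inp.filter (· != c)).length < inp.length :=
            (List.length_filter_lt_length_iff_exists ..).mpr ⟨c, hc, by simp⟩
          obtain ⟨l, hlne, hlnd, hlmem, rfl⟩ :=
            (ih _ hlen _ (preNE_filter hnd c) y rfl).mp hy
          refine ⟨c :: l, by simp, ?_, ?_, by simp [sconcat]⟩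
          · refine List.nodup_cons.mpr ⟨fun hcl => ?_, hlnd⟩
            have := hlmem c hcl
            simp [List.mem_filter] at this
          · intro y hyl
            rcases List.mem_cons.mp hyl with rfl | hyl
            · exact hc
            · exact List.mem_of_mem_filter (hlmem y hyl)
      · rintro ⟨l, hlne, hlnd, hlmem, rfl⟩
        obtain ⟨c, l', rfl⟩ := List.exists_cons_of_ne_nil hlne
        have hc : c ∈ inp := hlmem c (by simp)
        refine ⟨c, hc, ?_⟩
        by_cases hl' : l' = []
        · subst hl'
          simp [sconcat]
        · apply List.mem_cons_of_mem
          simp only [List.mem_map]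
          refine ⟨sconcat l', ?_, by simp [sconcat]⟩
          have hlen : (inp.filter (· != c)).length < inp.length :=
            (List.length_filter_lt_length_iff_exists ..).mpr ⟨c, hc, by simp⟩
          refine (ih _ hlen _ (preNE_filter hnd c) (sconcat l') rfl).mpr
            ⟨l', hl', (List.nodup_cons.mp hlnd).2, fun y hy => ?_, rfl⟩
          have hymem : y ∈ inp := hlmem y (List.mem_cons_of_mem c hy)
          have hyne : y ≠ c := fun h => (List.nodup_cons.mp hlnd).1 (h ▸ hy)
          exact List.mem_filter.mpr ⟨hymem, by simp [hyne]⟩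

theorem main_eq (inp : List String) (hnd : (inp.filter (· != "")).Nodup)
    (h2 : inp.length ≠ 2) : recursive_method inp = recursive_method_alt inp := by
  have hAmem : ∀ x, x ∈ recursive_method inp ↔
      x ∈ inp.flatMap (fun c1 =>
        c1 :: (recursive_method (inp.filter (· != c1))).map (fun c3 => c1 ++ c3)) := by
    intro x
    rw [recursive_method_eq inp h2, PySem.List.mem_sorted, PySem.Set.mem_ofList]
  rw [recursive_method_eq inp h2]
  unfold recursive_method_alt
  apply PySem.List.sorted_eq_sorted_of_perm _ _ _ (fun _ _ h => h)
  refine (List.perm_ext_iff_of_nodup (PySem.Set.nodup_ofList _) (PySem.Set.nodup_ofList _)).mpr ?_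
  intro x
  rw [PySem.Set.mem_ofList, PySem.Set.mem_ofList]
  exact ((hAmem x).symm.trans (mem_A_char inp hnd x)).trans (mem_genAll_char inp hnd x).symm

theorem list_lt_append (l m : List Char) (hm : m ≠ []) : l < l ++ m := by
  induction l with
  | nil =>
    cases m with
    | nil => simp at hm
    | cons c t => exact List.nil_lt_cons c t
  | cons a t ih =>
    rw [List.cons_append, List.cons_lt_cons_iff]
    exact Or.inr ⟨rfl, ih⟩

theorem str_not_lt_empty (s : String) : ¬ s < "" := by
  rw [String.lt_iff_toList_lt]; exact List.not_lt_nil _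

theorem str_lt_append (a b : String) (hb : b ≠ "") : a < a ++ b := by
  rw [String.lt_iff_toList_lt]
  simp only [String.toList_append]
  refine list_lt_append _ _ (fun h => hb ?_)
  have := congrArg String.ofList h
  simpa using this

-- ===== VERDICT (by name: the statement is the Claim_ definition above) =====
theorem recursive_method_spec : Claim_unchanged_recursive_method := by
  intro inp _ hpre hD
  by_cases h2 : inp.length = 2
  · match inp, h2 with
    | [a, b], _ =>
      have hord0 : a.toList < b.toList ∧ (a ++ b).toList < b.toList := by
        by_contra hc
        exact hD ⟨by simp, by simpa using hc⟩
      have hord : a < b ∧ a ++ b < b :=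
        ⟨String.lt_iff_toList_lt.mpr hord0.1, String.lt_iff_toList_lt.mpr hord0.2⟩
      have hbne : b ≠ "" := fun h => str_not_lt_empty a (h ▸ hord.1)
      have hane : a ≠ "" := by
        intro h
        subst h
        exact absurd hord.2 (by simp)
      have hchain : ([a, a ++ b, b, b ++ a] : List String).Pairwise (· < ·) := by
        have h1 : a < a ++ b := str_lt_append a b hbne
        have h2 : a ++ b < b := hord.2
        have h3 : b < b ++ a := str_lt_append b a hane
        have hab : a < b := lt_trans h1 h2
        refine List.Pairwise.cons ?_ (List.Pairwise.cons ?_ (List.Pairwise.cons ?_ (by simp)))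
        · intro y hy
          simp only [List.mem_cons, List.not_mem_nil, or_false] at hy
          rcases hy with rfl | rfl | rfl
          · exact h1
          · exact hab
          · exact lt_trans hab h3
        · intro y hy
          simp only [List.mem_cons, List.not_mem_nil, or_false] at hy
          rcases hy with rfl | rfl
          · exact h2
          · exact lt_trans h2 h3
        · intro y hy
          simp only [List.mem_cons, List.not_mem_nil, or_false] at hy
          rcases hy with rfl
          exact h3
      have hnd4 : ([a, a ++ b, b, b ++ a] : List String).Nodup :=
        hchain.imp (fun h => ne_of_lt h)
      rw [base_eval]
      unfold recursive_method_alt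
      rw [genAll_pair, PySem.Set.ofList_eq_self_of_nodup _ hnd4]
      exact (PySem.List.sorted_eq_self_of_pairwise _ _ (hchain.imp le_of_lt)).symm
  · exact main_eq inp hpre h2

theorem recursive_method_changed : Claim_changed_recursive_method := by
  unfold Claim_changed_recursive_method
  refine ⟨by decide, by decide, by decide, ?_, ?_, by decide⟩
  · show recursive_method ["b", "a"] = _
    rw [base_eval]; decide
  · show recursive_method_alt ["b", "a"] = _
    unfold recursive_method_alt
    rw [genAll_pair]
    have e1 : ("b" : String) ++ "a" = "ba" := by decide
    have e2 : ("a" : String) ++ "b" = "ab" := by decide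
    rw [e1, e2, PySem.Set.ofList_eq_self_of_nodup ["b", "ba", "a", "ab"] (by decide)]
    refine PySem.List.sorted_eq_of_perm_of_pairwise_lt _ _ _ (by decide) ?_
    show (["a", "ab", "b", "ba"] : List String).Pairwise (· < ·)
    simp only [List.pairwise_cons, List.mem_cons, List.not_mem_nil, or_false,
      String.lt_iff_toList_lt]
    refine ⟨?_, ?_, ?_, fun _ h => h.elim, List.Pairwise.nil⟩
    · rintro y (rfl | rfl | rfl) <;> decide
    · rintro y (rfl | rfl) <;> decide
    · rintro y rfl; decide

theorem recursive_method_tight : Claim_exact_recursive_method := by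
  intro inp _ _ hD heq
  obtain ⟨h2, hbad⟩ := hD
  match inp, h2 with
  | [a, b], _ =>
    have hpw : ([a, a ++ b, b, b ++ a] : List String).Pairwise (· < ·) := by
      rw [← base_eval a b, heq]
      unfold recursive_method_alt
      exact PySem.List.sorted_ofList_pairwise_lt _
    simp only [List.pairwise_cons, List.mem_cons] at hpw
    have h1 : a < a ++ b := hpw.1 (a ++ b) (by simp)
    have h2' : a ++ b < b := hpw.2.1 b (by simp)
    have hab : a < b := lt_trans h1 h2'
    refine hbad ⟨?_, ?_⟩ <;>
      simp only [List.getD_cons_zero, List.getD_cons_succ]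
    · exact String.lt_iff_toList_lt.mp hab
    · exact String.lt_iff_toList_lt.mp h2'
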